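-- pv_equiv track=rewrite | github.com/krivokuca/causallink | CausalDataLoader.py | _causal_phrase_index
-- ===== SOURCE A (Python) =====
-- def _causal_phrase_index(word_segments):
--     """
--     Takes a list of word segments and extracts the caual phrase index from the segments
--
--     Parameters:
--         - word_segments (list) :: The word segments
--
--     Returns:
--         cp_index (list) :: The causal phrase index
--     """
--     cp_index = []
--     labels = ['1', '2', '3', '4', '5', '6', '7', '8', '9', '10', '11']
--     for l in labels:
--         e = []
--         for i in range(len(word_segments)):
--             if word_segments[i] == 'e'+l:
--                 e.append(i-2*(int(l)-1))
--                 for j in range(i+1, len(word_segments)):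
--                     if word_segments[j] == 'e'+l and j-2 != i:
--                         e.append(j-2*int(l))
--                 break
--         if e != []:
--             cp_index.append([i for i in range(e[0], e[-1]+1)])
--
--     return cp_index
-- ===== SOURCE B (Python) =====
-- def _causal_phrase_index(word_segments):
--     # Build once: segment -> ordered list of indices where it occurs; then per label do direct lookups.
--     pos = {}
--     for i, w in enumerate(word_segments):
--         pos.setdefault(w, []).append(i)
--     cp_index = []
--     for n in range(1, 12):
--         ps = pos.get('e' + str(n), [])
--         if ps:
--             first = ps[0] - 2 * (n - 1)
--             cands = [p for p in ps[1:] if p != ps[0] + 2]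
--             last = cands[-1] - 2 * n if cands else first
--             cp_index.append(list(range(first, last + 1)))
--     return cp_index
-- ===== Notes on version B (the rewrite author's own statement) =====
-- stated objective: faster
-- what changed: Replaces A's per-label scan of the whole list (with a nested rescan after the first hit) by one pass building a dict from segment to its ordered occurrence indices, then direct per-label lookups on the position lists.
import Mathlib
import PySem

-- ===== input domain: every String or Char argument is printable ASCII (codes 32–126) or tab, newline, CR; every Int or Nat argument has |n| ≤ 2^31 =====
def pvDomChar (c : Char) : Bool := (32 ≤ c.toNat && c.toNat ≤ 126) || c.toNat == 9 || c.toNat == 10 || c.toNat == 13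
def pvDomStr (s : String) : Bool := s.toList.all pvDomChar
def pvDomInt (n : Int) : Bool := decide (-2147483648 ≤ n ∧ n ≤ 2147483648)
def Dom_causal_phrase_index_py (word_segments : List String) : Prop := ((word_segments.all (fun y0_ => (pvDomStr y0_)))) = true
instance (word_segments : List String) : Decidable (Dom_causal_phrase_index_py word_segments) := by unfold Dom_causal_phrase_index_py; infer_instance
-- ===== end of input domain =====

-- B replaces A's per-label nested scans by one pass building a dict from segment to its
-- occurrence indices, then per-label direct lookups (objective: alternative/simpler; equal return value).

-- ===== PORT A =====
-- inner loop: 'for j in range(i+1, len(ws)): if ws[j] == tag and j-2 != i: e.append(j-2*l)'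
def pvAInner (tag : String) (i0 l : Int) : List String → Int → List Int
  | [], _ => []
  | w :: rest, j =>
    if w = tag ∧ j - 2 ≠ i0 then (j - 2 * l) :: pvAInner tag i0 l rest (j + 1)
    else pvAInner tag i0 l rest (j + 1)

-- outer loop with break: the first i with ws[i] == tag starts e, then the inner scan, then break
def pvAOuter (tag : String) (l : Int) : List String → Int → List Int
  | [], _ => []
  | w :: rest, i =>
    if w = tag then (i - 2 * (l - 1)) :: pvAInner tag i l rest (i + 1)
    else pvAOuter tag l rest (i + 1)

-- one iteration of A's 'for l in labels' body
def pvAStep (ws : List String) (cp_index : List (List Int)) (l : String) : List (List Int) :=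
  let lv := (PySem.Int.ofStr? l).getD 0   -- int(l); the labels are literal digit strings, never a ValueError
  let e := pvAOuter ("e" ++ l) lv ws 0
  if e ≠ [] then cp_index ++ [PySem.List.pyRange (e.headD 0) (e.getLastD 0 + 1) 1]
  else cp_index

def causal_phrase_index_py (word_segments : List String) : List (List Int) :=
  (["1", "2", "3", "4", "5", "6", "7", "8", "9", "10", "11"] : List String).foldl
    (pvAStep word_segments) []

-- ===== PORT B =====
-- one pass: 'for i, w in enumerate(word_segments): pos.setdefault(w, []).append(i)'
def pvBIndex (ws : List String) : PySem.Dict String (List Int) :=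
  (PySem.List.enumerate ws).foldl (fun d p => d.modify p.2 [] (· ++ [p.1])) PySem.Dict.empty

-- one iteration of B's 'for n in range(1, 12)' body
def pvBStep (pos : PySem.Dict String (List Int)) (cp_index : List (List Int)) (n : Int) :
    List (List Int) :=
  let ps := pos.getD ("e" ++ PySem.Int.toStr n) []
  if ps ≠ [] then
    let first := ps.headD 0 - 2 * (n - 1)
    let cands := (ps.drop 1).filter (fun p => p ≠ ps.headD 0 + 2)
    let last := if cands ≠ [] then cands.getLastD 0 - 2 * n else first
    cp_index ++ [PySem.List.pyRange first (last + 1) 1]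
  else cp_index

def causal_phrase_index_py_alt (word_segments : List String) : List (List Int) :=
  let pos := pvBIndex word_segments
  (PySem.List.pyRange 1 12 1).foldl (pvBStep pos) []

-- ===== PRECONDITION & SPEC =====
def Spec_causal_phrase_index_py (word_segments : List String) (out : List (List Int)) : Prop := out = causal_phrase_index_py_alt word_segments
instance (word_segments : List String) (out : List (List Int)) : Decidable (Spec_causal_phrase_index_py word_segments out) := by unfold Spec_causal_phrase_index_py; infer_instance

-- ===== CLAIM (what is proved, stated in full; the proofs are below) =====
def Claim_equal_causal_phrase_index_py : Prop := ∀ (word_segments : List String), Dom_causal_phrase_index_py word_segments → Spec_causal_phrase_index_py word_segments (causal_phrase_index_py word_segments)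

-- ===== LEMMAS AND PROOFS =====

-- positions of tag t in ws, occurrence indices starting at i
def pvOcc (ws : List String) (i : Int) (t : String) : List Int :=
  ((PySem.List.enumerate ws i).filter (fun p => p.2 == t)).map (·.1)

theorem pvOcc_nil (i : Int) (t : String) : pvOcc [] i t = [] := rfl

theorem pvOcc_cons (w : String) (ws : List String) (i : Int) (t : String) :
    pvOcc (w :: ws) i t = (if w = t then [i] else []) ++ pvOcc ws (i + 1) t := by
  simp only [pvOcc, PySem.List.enumerate_cons, List.filter_cons]
  by_cases h : w = t <;> simp [h]

theorem pvAInner_eq (t : String) (i0 l : Int) (ws : List String) (j : Int) :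
    pvAInner t i0 l ws j =
      ((pvOcc ws j t).filter (fun p => p ≠ i0 + 2)).map (· - 2 * l) := by
  induction ws generalizing j with
  | nil => simp [pvAInner, pvOcc_nil]
  | cons w rest ih =>
    rw [pvAInner, pvOcc_cons, ih]
    by_cases hw : w = t
    · by_cases hj : j = i0 + 2
      · simp [hw, hj]
      · have : j - 2 ≠ i0 := by omega
        simp [hw, hj, this]
    · simp [hw]

theorem pvAOuter_eq (t : String) (l : Int) (ws : List String) (i : Int) :
    pvAOuter t l ws i =
      match pvOcc ws i t with
      | [] => []
      | p0 :: rest =>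
        (p0 - 2 * (l - 1)) :: ((rest.filter (fun p => p ≠ p0 + 2)).map (· - 2 * l)) := by
  induction ws generalizing i with
  | nil => simp [pvAOuter, pvOcc_nil]
  | cons w rest ih =>
    rw [pvAOuter, pvOcc_cons]
    by_cases hw : w = t
    · simp [hw, pvAInner_eq]
    · simp [hw, ih]

-- the dict of B delivers exactly pvOcc
theorem pvB_getD (ws : List String) (t : String) :
    (pvBIndex ws).getD t [] = pvOcc ws 0 t := by
  have h : pvBIndex ws =
      ((PySem.List.enumerate ws).map (fun p => (p.2, p.1))).foldl
        (fun d q => d.modify q.1 [] (· ++ [q.2])) PySem.Dict.empty := by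
    rw [pvBIndex, List.foldl_map]
  rw [h, PySem.Dict.getD_foldl_modify_append]
  simp [pvOcc, List.filter_map, Function.comp_def]

theorem pvGetLastD_map_sub (c : Int) (cs : List Int) (l : Int) :
    ((cs.map (· - 2 * l)).getLastD (c - 2 * l)) = (cs.getLastD c) - 2 * l := by
  induction cs generalizing c with
  | nil => rfl
  | cons d ds ih => rw [List.map_cons, List.getLastD_cons, List.getLastD_cons]; exact ih d

-- one label's contribution: A's step equals B's step
theorem pvStep_eq (ws : List String) (acc : List (List Int)) (l : String) (n : Int)
    (h1 : (PySem.Int.ofStr? l).getD 0 = n) (h2 : PySem.Int.toStr n = l) :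
    pvAStep ws acc l = pvBStep (pvBIndex ws) acc n := by
  rw [pvAStep, pvBStep, h1, h2, pvB_getD, pvAOuter_eq]
  cases hocc : pvOcc ws 0 ("e" ++ l) with
  | nil => simp
  | cons p0 rest =>
    simp only [List.headD_cons, List.drop_one, List.tail_cons, ne_eq, reduceCtorEq,
      not_false_eq_true, if_true]
    have hlast : ((p0 - 2 * (n - 1)) ::
        ((rest.filter (fun p => ¬p = p0 + 2)).map (· - 2 * n))).getLastD 0 =
        (if ¬rest.filter (fun p => ¬p = p0 + 2) = [] then
          (rest.filter (fun p => ¬p = p0 + 2)).getLastD 0 - 2 * n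
        else p0 - 2 * (n - 1)) := by
      cases hc : rest.filter (fun p => ¬p = p0 + 2) with
      | nil => simp
      | cons c cs =>
        simp only [List.map_cons, List.getLastD_cons, reduceCtorEq, not_false_eq_true,
          if_true, pvGetLastD_map_sub]
    rw [hlast]
    rfl

-- ===== VERDICT (by name: the statement is the Claim_ definition above) =====
theorem causal_phrase_index_py_spec : Claim_equal_causal_phrase_index_py := by
  intro ws _
  unfold Spec_causal_phrase_index_py causal_phrase_index_py causal_phrase_index_py_alt
  have hrange : PySem.List.pyRange 1 12 1 = [1, 2, 3, 4, 5, 6, 7, 8, 9, 10, 11] := by decide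
  rw [hrange]
  simp only [List.foldl_cons, List.foldl_nil]
  rw [pvStep_eq ws _ "1" 1 (by decide) (by decide), pvStep_eq ws _ "2" 2 (by decide) (by decide),
    pvStep_eq ws _ "3" 3 (by decide) (by decide), pvStep_eq ws _ "4" 4 (by decide) (by decide),
    pvStep_eq ws _ "5" 5 (by decide) (by decide), pvStep_eq ws _ "6" 6 (by decide) (by decide),
    pvStep_eq ws _ "7" 7 (by decide) (by decide), pvStep_eq ws _ "8" 8 (by decide) (by decide),
    pvStep_eq ws _ "9" 9 (by decide) (by decide), pvStep_eq ws _ "10" 10 (by decide) (by decide),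
    pvStep_eq ws _ "11" 11 (by decide) (by decide)]
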